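-- pv_equiv track=rewrite | github.com/genropy/genropy | gnrpy/tests/sql/test_compiler_simulation.py | _select_paths
-- ===== SOURCE A (Python) =====
-- def _select_paths(all_paths, per_depth=10):
--     """Pick up to per_depth paths from each depth level."""
--     by_depth = {}
--     for p, d in all_paths:
--         by_depth.setdefault(d, []).append(p)
--     selected = []
--     depths = {}
--     for d in sorted(by_depth):
--         take = by_depth[d][:per_depth]
--         selected.extend(take)
--         depths[d] = len(take)
--     return selected, depths
-- ===== SOURCE B (Python) =====
-- def _select_paths(all_paths, per_depth=10):
--     """Pick up to per_depth paths from each depth level.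
--
--     Sort once by depth (stable, so within-depth order is preserved), then
--     scan the sorted list in one pass, cutting it into consecutive runs of
--     equal depth with two pointers; slice each run to per_depth.
--     """
--     ordered = sorted(all_paths, key=lambda x: x[1])
--     selected = []
--     depths = {}
--     i, n = 0, len(ordered)
--     while i < n:
--         d = ordered[i][1]
--         j = i
--         while j < n and ordered[j][1] == d:
--             j += 1
--         take = [p for p, _ in ordered[i:j]][:per_depth]
--         selected.extend(take)
--         depths[d] = len(take)
--         i = j
--     return selected, depths
-- ===== Notes on version B (the rewrite author's own statement) =====
-- stated objective: alternative
-- what changed: Replaces the dict-of-lists grouping plus per-key lookup by one stable sort on depth followed by a single two-pointer scan that cuts the sorted list into runs of equal depth.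
import Mathlib
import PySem

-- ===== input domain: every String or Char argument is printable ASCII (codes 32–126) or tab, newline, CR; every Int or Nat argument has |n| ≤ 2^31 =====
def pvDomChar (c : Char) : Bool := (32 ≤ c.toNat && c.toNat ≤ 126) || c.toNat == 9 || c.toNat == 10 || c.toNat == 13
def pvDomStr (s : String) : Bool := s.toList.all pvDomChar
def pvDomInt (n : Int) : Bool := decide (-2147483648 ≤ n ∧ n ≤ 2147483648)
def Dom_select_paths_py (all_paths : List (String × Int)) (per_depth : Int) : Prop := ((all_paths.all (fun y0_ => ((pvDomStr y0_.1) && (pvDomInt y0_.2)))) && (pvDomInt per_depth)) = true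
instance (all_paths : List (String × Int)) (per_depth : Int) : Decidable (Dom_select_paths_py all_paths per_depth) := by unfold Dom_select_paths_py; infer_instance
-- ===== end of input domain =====

-- B replaces A's dict-grouping + per-key lookup by one stable sort on depth followed by a single
-- two-pointer scan over the runs of equal depth (objective: alternative, same exact results).

-- ===== PORT A =====
def select_paths_py (all_paths : List (String × Int)) (per_depth : Int) : List String × (List (Int × Int)) :=
  -- by_depth = {}; for p, d in all_paths: by_depth.setdefault(d, []).append(p)
  let by_depth : PySem.Dict Int (List String) :=
    all_paths.foldl (fun dd pd => dd.modify pd.2 [] (fun v => v ++ [pd.1])) PySem.Dict.empty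
  -- selected = []; depths = {}; for d in sorted(by_depth): take = by_depth[d][:per_depth]; …
  let res :=
    (PySem.List.sorted by_depth.keys (fun x => x)).foldl
      (fun acc d =>
        let take := PySem.List.slice (by_depth.getD d []) none (some per_depth)
        (acc.1 ++ take, acc.2.insert d (take.length : Int)))
      (([] : List String), (PySem.Dict.empty : PySem.Dict Int Int))
  (res.1, res.2.items)

-- ===== PORT B =====
-- inner while loop: 'j = i; while j < n and ordered[j][1] == d: j += 1' — yields the run's
-- paths ([p for p, _ in ordered[i:j]]) and the remaining suffix ordered[j:]
def runSplit (d : Int) : List (String × Int) → List String × List (String × Int)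
  | [] => ([], [])
  | (p, dd) :: rest =>
    if dd == d then
      let r := runSplit d rest
      (p :: r.1, r.2)
    else ([], (p, dd) :: rest)

-- termination measure for the outer while loop ('i = j' strictly advances)
theorem runSplit_length_le (d : Int) (l : List (String × Int)) : (runSplit d l).2.length ≤ l.length := by
  induction l with
  | nil => simp [runSplit]
  | cons q rest ih =>
    obtain ⟨p, dd⟩ := q
    by_cases h : dd == d <;> simp [runSplit, h] <;> omega

-- outer while loop: 'while i < n: … take = [p for p,_ in ordered[i:j]][:per_depth]; …; i = j'
def scanRuns (per_depth : Int) : List (String × Int) → List String × List (Int × Int)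
  | [] => ([], [])
  | (p, d) :: rest =>
    let r := runSplit d rest
    let take := PySem.List.slice (p :: r.1) none (some per_depth)
    let res := scanRuns per_depth r.2
    (take ++ res.1, (d, (take.length : Int)) :: res.2)
termination_by l => l.length
decreasing_by
  simp only [List.length_cons]
  exact Nat.lt_succ_of_le (runSplit_length_le d rest)

def select_paths_py_alt (all_paths : List (String × Int)) (per_depth : Int) : List String × (List (Int × Int)) :=
  -- ordered = sorted(all_paths, key=lambda x: x[1]); then the two-pointer scan
  scanRuns per_depth (PySem.List.sorted all_paths (fun x => x.2))

-- ===== PRECONDITION & SPEC =====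
def Spec_select_paths_py (all_paths : List (String × Int)) (per_depth : Int) (out : List String × (List (Int × Int))) : Prop := out = select_paths_py_alt all_paths per_depth
instance (all_paths : List (String × Int)) (per_depth : Int) (out : List String × (List (Int × Int))) : Decidable (Spec_select_paths_py all_paths per_depth out) := by unfold Spec_select_paths_py; infer_instance

-- ===== CLAIM (what is proved, stated in full; the proofs are below) =====
def Claim_equal_select_paths_py : Prop := ∀ (all_paths : List (String × Int)) (per_depth : Int), Dom_select_paths_py all_paths per_depth → Spec_select_paths_py all_paths per_depth (select_paths_py all_paths per_depth)

-- ===== LEMMAS AND PROOFS =====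

-- sortedness hypothesis threaded through B's scan: depth keys nondecreasing
def SortedKeys (l : List (String × Int)) : Prop := l.Pairwise (fun a b => a.2 ≤ b.2)

-- the run keys scanRuns visits, in order
def rKeys : List (String × Int) → List Int
  | [] => []
  | (_, d) :: rest => d :: rKeys (runSplit d rest).2
termination_by l => l.length
decreasing_by
  simp only [List.length_cons]
  exact Nat.lt_succ_of_le (runSplit_length_le d rest)

-- what one run split does on a sorted list all of whose keys are ≥ d
theorem runSplit_spec (d : Int) (l : List (String × Int)) (hp : SortedKeys l)
    (hd : ∀ q ∈ l, d ≤ q.2) :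
    (runSplit d l).1 = (l.filter (fun p => p.2 == d)).map (·.1) ∧
    (∀ q ∈ (runSplit d l).2, d < q.2) ∧
    SortedKeys (runSplit d l).2 ∧
    (runSplit d l).2 ⊆ l ∧
    (∀ q ∈ l, q.2 = d ∨ q ∈ (runSplit d l).2) ∧
    (∀ c : Int, c ≠ d → l.filter (fun p => p.2 == c) = ((runSplit d l).2).filter (fun p => p.2 == c)) := by
  induction l with
  | nil => simp [runSplit, SortedKeys]
  | cons q rest ih =>
    obtain ⟨p, dd⟩ := q
    rw [SortedKeys, List.pairwise_cons] at hp
    obtain ⟨hq, hrest⟩ := hp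
    by_cases h : dd = d
    · subst h
      have hd' : ∀ q ∈ rest, dd ≤ q.2 := fun q hq' => hd q (List.mem_cons_of_mem _ hq')
      obtain ⟨i1, i2, i3, i4, i5, i6⟩ := ih hrest hd'
      have hsp : runSplit dd ((p, dd) :: rest) = (p :: (runSplit dd rest).1, (runSplit dd rest).2) := by
        simp [runSplit]
      rw [hsp]
      refine ⟨?_, ?_, i3, ?_, ?_, ?_⟩
      · simp [i1]
      · intro q hq'; exact i2 q hq'
      · intro q hq'; exact List.mem_cons_of_mem _ (i4 hq')
      · intro q hq'
        rcases List.mem_cons.mp hq' with h' | h'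
        · left; simp [h']
        · rcases i5 q h' with h'' | h''
          · left; exact h''
          · right; exact h''
      · intro c hc
        have : (dd == c) = false := by simp; omega
        simp only [List.filter_cons]
        simp [this, i6 c hc]
    · have hlt : d < dd := lt_of_le_of_ne (hd (p, dd) (List.mem_cons_self)) (Ne.symm h)
      have hnone : ∀ q ∈ rest, d < q.2 := fun q hq' => lt_of_lt_of_le hlt (hq q hq')
      have hsplit : runSplit d ((p, dd) :: rest) = ([], (p, dd) :: rest) := by
        simp [runSplit, h]
      refine ⟨?_, ?_, ?_, ?_, ?_, ?_⟩
      · rw [hsplit]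
        have : ∀ q ∈ (p, dd) :: rest, ¬ (q.2 == d) = true := by
          intro q hq'
          rcases List.mem_cons.mp hq' with h' | h'
          · simp [h']; omega
          · have := hnone q h'; simp; omega
        simp [List.filter_eq_nil_iff.mpr this]
      · rw [hsplit]
        intro q hq'
        rcases List.mem_cons.mp hq' with h' | h'
        · simp [h']; omega
        · exact hnone q h'
      · rw [hsplit]; exact List.pairwise_cons.mpr ⟨hq, hrest⟩
      · rw [hsplit]; exact fun q hq' => hq'
      · rw [hsplit]; intro q hq'; right; exact hq'
      · intro c hc; rw [hsplit]

-- B's scan, on a sorted list, produces the per-run filters, and rKeys is the strictly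
-- increasing list of exactly the depths present (fuel induction on the length)
theorem fuel_main (pd : Int) : ∀ (n : Nat) (l : List (String × Int)), l.length ≤ n → SortedKeys l →
    (scanRuns pd l =
      ((rKeys l).flatMap (fun d => PySem.List.slice ((l.filter (fun p => p.2 == d)).map (·.1)) none (some pd)),
       (rKeys l).map (fun d => (d, ((PySem.List.slice ((l.filter (fun p => p.2 == d)).map (·.1)) none (some pd)).length : Int)))) ∧
     (rKeys l).Pairwise (· < ·) ∧ (∀ c : Int, c ∈ rKeys l ↔ c ∈ l.map (·.2))) := by
  intro n
  induction n with
  | zero =>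
    intro l hl _
    have : l = [] := List.length_eq_zero_iff.mp (Nat.le_zero.mp hl)
    subst this
    simp [scanRuns, rKeys]
  | succ n ih =>
    intro l hl hp
    match l with
    | [] => simp [scanRuns, rKeys]
    | (p, d) :: rest =>
      rw [SortedKeys, List.pairwise_cons] at hp
      obtain ⟨hq, hrest⟩ := hp
      obtain ⟨i1, i2, i3, i4, i5, i6⟩ := runSplit_spec d rest hrest hq
      have hlen : (runSplit d rest).2.length ≤ n := by
        have := runSplit_length_le d rest
        simp only [List.length_cons] at hl
        omega
      obtain ⟨IH1, IH2, IH3⟩ := ih (runSplit d rest).2 hlen i3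
      have hfd : (((p, d) :: rest).filter (fun q => q.2 == d)).map (·.1) = p :: (runSplit d rest).1 := by
        simp [i1]
      have hfc : ∀ c : Int, c ≠ d → ((p, d) :: rest).filter (fun q => q.2 == c)
          = ((runSplit d rest).2).filter (fun q => q.2 == c) := by
        intro c hc
        rw [List.filter_cons, if_neg (by simp; omega), i6 c hc]
      have hKgt : ∀ c ∈ rKeys (runSplit d rest).2, d < c := by
        intro c hc
        rcases List.mem_map.mp ((IH3 c).mp hc) with ⟨q, hq2, rfl⟩
        exact i2 q hq2
      have hrk : rKeys ((p, d) :: rest) = d :: rKeys (runSplit d rest).2 := by rw [rKeys]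
      have hscan : scanRuns pd ((p, d) :: rest)
          = (PySem.List.slice (p :: (runSplit d rest).1) none (some pd) ++ (scanRuns pd (runSplit d rest).2).1,
             (d, ((PySem.List.slice (p :: (runSplit d rest).1) none (some pd)).length : Int)) :: (scanRuns pd (runSplit d rest).2).2) := by
        rw [scanRuns]
      have hfc' : ∀ c ∈ rKeys (runSplit d rest).2,
          ((runSplit d rest).2).filter (fun q => q.2 == c) = ((p, d) :: rest).filter (fun q => q.2 == c) := by
        intro c hc
        exact (hfc c (by have := hKgt c hc; omega)).symm
      refine ⟨?_, ?_, ?_⟩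
      · rw [hscan, hrk, IH1]
        simp only [List.flatMap_cons, List.map_cons, hfd]
        rw [Prod.ext_iff]
        constructor
        · show _ ++ _ = _ ++ _
          congr 1
          rw [List.flatMap_def, List.flatMap_def]
          exact congrArg List.flatten (List.map_congr_left (fun c hc => by rw [hfc' c hc]))
        · show _ :: _ = _ :: _
          congr 1
          exact List.map_congr_left (fun c hc => by rw [hfc' c hc])
      · rw [hrk]
        exact List.pairwise_cons.mpr ⟨hKgt, IH2⟩
      · intro c
        rw [hrk]
        simp only [List.mem_cons, List.map_cons]
        constructor
        · rintro (rfl | hc)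
          · left; rfl
          · rcases List.mem_map.mp ((IH3 c).mp hc) with ⟨q, hq2, rfl⟩
            right; exact List.mem_map_of_mem (i4 hq2)
        · rintro (rfl | h)
          · left; rfl
          · rcases List.mem_map.mp h with ⟨q, hq2, rfl⟩
            rcases i5 q hq2 with h' | h'
            · left; exact h'
            · right; exact (IH3 q.2).mpr (List.mem_map_of_mem h')

-- stability of the sort: insertion at the key boundary keeps within-key order
theorem filt_insertBy (x : String × Int) (c : Int) :
    ∀ (ys : List (String × Int)), ys.Pairwise (fun a b => a.2 ≤ b.2) →
    (PySem.List.insertBy (fun a b => decide (a.2 < b.2)) x ys).filter (fun p => p.2 == c) =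
      if x.2 == c then ys.filter (fun p => p.2 == c) ++ [x] else ys.filter (fun p => p.2 == c) := by
  intro ys
  induction ys with
  | nil => intro _; simp [PySem.List.insertBy]; split_ifs <;> simp_all
  | cons y ys ih =>
    intro hp
    rw [List.pairwise_cons] at hp
    obtain ⟨hy, hys⟩ := hp
    by_cases hlt : x.2 < y.2
    · rw [show PySem.List.insertBy (fun a b => decide (a.2 < b.2)) x (y :: ys) = x :: y :: ys from by
        simp [PySem.List.insertBy, hlt]]
      by_cases hxc : x.2 = c
      · have hno : ∀ q ∈ y :: ys, ¬ (q.2 == c) = true := by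
          intro q hq
          rcases List.mem_cons.mp hq with rfl | hq'
          · simp; omega
          · have := hy q hq'; simp; omega
        rw [List.filter_cons_of_pos (by simp [hxc])]
        rw [List.filter_eq_nil_iff.mpr hno]
        simp [hxc]
      · rw [List.filter_cons_of_neg (by simp [hxc])]
        simp [hxc]
    · rw [show PySem.List.insertBy (fun a b => decide (a.2 < b.2)) x (y :: ys) =
          y :: PySem.List.insertBy (fun a b => decide (a.2 < b.2)) x ys from by
        simp [PySem.List.insertBy, hlt]]
      rw [List.filter_cons, List.filter_cons, ih hys]
      split_ifs with h1 h2 h2 <;> simp_all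

-- stability: within one depth the original order survives the sort
theorem sorted_filter_key (xs : List (String × Int)) (c : Int) :
    (PySem.List.sorted xs (fun x => x.2)).filter (fun p => p.2 == c) = xs.filter (fun p => p.2 == c) := by
  induction xs using List.reverseRecOn with
  | nil => rfl
  | append_singleton xs x ih =>
    rw [PySem.List.sorted_eq_foldl_insertBy, List.foldl_append, List.foldl_cons, List.foldl_nil,
      ← PySem.List.sorted_eq_foldl_insertBy]
    rw [filt_insertBy x c _ (PySem.List.sorted_pairwise xs (fun x => x.2)), ih]
    rw [List.filter_append]
    by_cases hxc : x.2 = c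
    · simp [hxc]
    · simp [hxc]

-- A rewritten into the common normal form: sorted distinct depths, filters, slices
theorem portA_normal (all_paths : List (String × Int)) (pd : Int) :
    select_paths_py all_paths pd =
      (let ds := PySem.List.sorted (PySem.Set.ofList (all_paths.map (·.2))) (fun x => x)
       (ds.flatMap (fun d => PySem.List.slice ((all_paths.filter (fun p => p.2 == d)).map (·.1)) none (some pd)),
        ds.map (fun d => (d, ((PySem.List.slice ((all_paths.filter (fun p => p.2 == d)).map (·.1)) none (some pd)).length : Int))))) := by
  have hgetD : ∀ c : Int,
      (all_paths.foldl (fun dd p => dd.modify p.2 [] (fun v => v ++ [p.1])) PySem.Dict.empty).getD c []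
        = (all_paths.filter (fun p => p.2 == c)).map (·.1) := by
    intro c
    rw [show all_paths.foldl (fun dd p => dd.modify p.2 [] (fun v => v ++ [p.1])) PySem.Dict.empty
        = (all_paths.map Prod.swap).foldl (fun dd q => dd.modify q.1 [] (fun v => v ++ [q.2])) PySem.Dict.empty from by
      rw [List.foldl_map]; rfl]
    rw [PySem.Dict.getD_foldl_modify_append]
    rw [List.filter_map]
    simp [Function.comp_def, Prod.swap]
  have hkeys : (all_paths.foldl (fun dd p => dd.modify p.2 [] (fun v => v ++ [p.1])) PySem.Dict.empty).keys
      = PySem.Set.ofList (all_paths.map (·.2)) := by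
    rw [PySem.Dict.keys_foldl_modify_key all_paths (fun p => p.2) [] (fun _ p => (fun v => v ++ [p.1]))]
    rfl
  have hnd : (PySem.List.sorted (PySem.Set.ofList (all_paths.map (·.2))) (fun x => x)).Nodup :=
    (PySem.List.sorted_ofList_pairwise_lt (all_paths.map (·.2))).nodup
  unfold select_paths_py
  simp only [hkeys, hgetD]
  rw [PySem.List.foldl_prod_mk
      (f := fun a d => a ++ PySem.List.slice ((all_paths.filter (fun p => p.2 == d)).map (·.1)) none (some pd))
      (g := fun b d => PySem.Dict.insert b d ((PySem.List.slice ((all_paths.filter (fun p => p.2 == d)).map (·.1)) none (some pd)).length : Int))]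
  rw [PySem.List.foldl_append_eq_flatMap]
  rw [PySem.Dict.items_foldl_insert_fresh _ (fun d => d)
      (fun d => ((PySem.List.slice ((all_paths.filter (fun p => p.2 == d)).map (·.1)) none (some pd)).length : Int))
      PySem.Dict.empty (fun a _ => PySem.Dict.contains_empty a) (by simpa using hnd)]
  simp [PySem.Dict.empty]

-- ===== VERDICT (by name: the statement is the Claim_ definition above) =====
theorem select_paths_py_spec : Claim_equal_select_paths_py := by
  intro all_paths pd _
  unfold Spec_select_paths_py select_paths_py_alt
  set ordered := PySem.List.sorted all_paths (fun x => x.2) with hord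
  have hsk : SortedKeys ordered := PySem.List.sorted_pairwise all_paths (fun x => x.2)
  obtain ⟨h1, h2, h3⟩ := fuel_main pd ordered.length ordered le_rfl hsk
  rw [h1]
  -- replace ordered's filters by all_paths' (stability of the sort)
  have hfilt : ∀ c : Int, ordered.filter (fun p => p.2 == c) = all_paths.filter (fun p => p.2 == c) :=
    fun c => sorted_filter_key all_paths c
  -- rKeys ordered IS sorted(set of depths)
  have hperm : (rKeys ordered).Perm (PySem.Set.ofList (all_paths.map (·.2))) := by
    rw [List.perm_ext_iff_of_nodup h2.nodup (PySem.Set.nodup_ofList _)]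
    intro c
    rw [h3 c, PySem.Set.mem_ofList]
    exact List.Perm.mem_iff (List.Perm.map _ (PySem.List.sorted_perm all_paths (fun x => x.2) false))
  have hds : PySem.List.sorted (PySem.Set.ofList (all_paths.map (·.2))) (fun x => x) = rKeys ordered :=
    PySem.List.sorted_eq_of_perm_of_pairwise_lt _ _ _ hperm h2
  rw [portA_normal]
  simp only [hds]
  rw [Prod.ext_iff]
  constructor
  · show List.flatMap _ _ = List.flatMap _ _
    rw [List.flatMap_def, List.flatMap_def]
    exact congrArg List.flatten (List.map_congr_left (fun c _ => by rw [hfilt c]))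
  · exact List.map_congr_left (fun c _ => by rw [hfilt c])
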